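-- pv_equiv track=rewrite | github.com/ecassmage/Python | AI Games/Hexapawn_AI/Hexapawn Files/Checkerboard_Visuals.py | checkerboard_construct
-- ===== SOURCE A (Python) =====
-- def checkerboard_construct(x):
--     row, checker_board, checker_board_coord, prev = [], [], [], 1
--     for row_build in range(x):
--         row, checker_board_coord_row = [], []
--         for row_column in range(x):
--             if prev == 1:
--                 row.append(0)
--                 checker_board_coord_row.append((row_build, row_column))
--                 prev = 0
--             else:
--                 row.append(1)
--                 checker_board_coord_row.append((row_build, row_column))
--                 prev = 1
--         checker_board_coord.append(checker_board_coord_row)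
--         checker_board.append(row)
--         prev = row[0]
--     return checker_board, checker_board_coord
-- ===== SOURCE B (Python) =====
-- def checkerboard_construct(x):
--     checker_board = [[(r + c) % 2 for c in range(x)] for r in range(x)]
--     checker_board_coord = [[(r, c) for c in range(x)] for r in range(x)]
--     return checker_board, checker_board_coord
-- ===== Notes on version B (the rewrite author's own statement) =====
-- stated objective: simpler
-- what changed: Replaces the carried alternating prev state machine (toggled per cell and reset from the row head per row) with the closed-form row-plus-column parity computed directly in a nested comprehension.
import Mathlib
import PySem

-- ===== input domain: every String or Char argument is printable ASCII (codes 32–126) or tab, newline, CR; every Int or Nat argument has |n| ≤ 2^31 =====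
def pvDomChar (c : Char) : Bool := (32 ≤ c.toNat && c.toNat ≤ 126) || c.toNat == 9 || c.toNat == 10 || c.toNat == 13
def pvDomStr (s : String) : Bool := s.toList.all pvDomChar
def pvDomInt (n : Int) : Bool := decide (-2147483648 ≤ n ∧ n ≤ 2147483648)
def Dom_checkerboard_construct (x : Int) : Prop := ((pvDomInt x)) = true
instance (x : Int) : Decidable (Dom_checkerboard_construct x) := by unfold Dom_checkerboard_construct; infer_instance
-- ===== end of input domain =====

-- B replaces A's carried alternating `prev` state with closed-form row-plus-column parity (simpler).

-- ===== PORT A =====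
-- inner loop body: appends 0/1 depending on prev and flips prev
def pvInnerA (row_build : Int) (st : List Int × List (Int × Int) × Int) (c : Int) :
    List Int × List (Int × Int) × Int :=
  let (row, crow, prev) := st
  if prev = 1 then (row ++ [0], crow ++ [(row_build, c)], 0)
  else (row ++ [1], crow ++ [(row_build, c)], 1)

-- outer loop body: builds one row, then prev = row[0] (row is nonempty whenever
-- this body runs in Python, i.e. x ≥ 1, so the getD default is never used)
def pvOuterA (x : Int) (st : List (List Int) × List (List (Int × Int)) × Int) (_r : Int) :
    List (List Int) × List (List (Int × Int)) × Int :=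
  let (cb, cbc, prev) := st
  let (row, crow, _prev') := (PySem.List.pyRange 0 x 1).foldl (pvInnerA _r) ([], [], prev)
  (cb ++ [row], cbc ++ [crow], (PySem.List.pyGet? row 0).getD 0)

def checkerboard_construct (x : Int) : List (List Int) × (List (List (Int × Int))) :=
  let st := (PySem.List.pyRange 0 x 1).foldl (pvOuterA x) ([], [], 1)
  (st.1, st.2.1)

-- ===== PORT B =====
def checkerboard_construct_alt (x : Int) : List (List Int) × (List (List (Int × Int))) :=
  ((PySem.List.pyRange 0 x 1).map (fun r => (PySem.List.pyRange 0 x 1).map (fun c => PySem.Int.mod (r + c) 2)),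
   (PySem.List.pyRange 0 x 1).map (fun r => (PySem.List.pyRange 0 x 1).map (fun c => (r, c))))

-- ===== PRECONDITION & SPEC =====
def Spec_checkerboard_construct (x : Int) (out : List (List Int) × (List (List (Int × Int)))) : Prop := out = checkerboard_construct_alt x
instance (x : Int) (out : List (List Int) × (List (List (Int × Int)))) : Decidable (Spec_checkerboard_construct x out) := by unfold Spec_checkerboard_construct; infer_instance

-- ===== CLAIM (what is proved, stated in full; the proofs are below) =====
def Claim_equal_checkerboard_construct : Prop := ∀ (x : Int), Dom_checkerboard_construct x → Spec_checkerboard_construct x (checkerboard_construct x)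

-- ===== LEMMAS AND PROOFS =====

-- inner loop: starting from prev = p ∈ {0,1}, m steps produce the alternating row
lemma innerA_nat (rb p : Int) (hp : p = 0 ∨ p = 1) (m : Nat) :
    ((List.range m).map (fun k : Nat => (k : Int))).foldl (pvInnerA rb) ([], [], p)
      = ((List.range m).map (fun k : Nat => ((1 : Int) - p + (k : Int)) % 2),
         (List.range m).map (fun k : Nat => (rb, (k : Int))),
         (p + (m : Int)) % 2) := by
  induction m with
  | zero =>
    simp only [List.range_zero, List.map_nil, List.foldl_nil, Nat.cast_zero]
    rw [show (p + (0 : Int)) % 2 = p by omega]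
  | succ m ih =>
    rw [List.range_succ]
    simp only [List.map_append, List.map_cons, List.map_nil, List.foldl_append,
      List.foldl_cons, List.foldl_nil, ih, pvInnerA, Nat.cast_add, Nat.cast_one]
    by_cases h2 : (p + (m : Int)) % 2 = 1
    · rw [if_pos h2]
      refine congrArg₂ Prod.mk ?_ (congrArg₂ Prod.mk rfl ?_)
      · congr 1
        simp only [List.cons.injEq, and_true]
        omega
      · omega
    · rw [if_neg h2]
      refine congrArg₂ Prod.mk ?_ (congrArg₂ Prod.mk rfl ?_)
      · congr 1
        simp only [List.cons.injEq, and_true]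
        omega
      · omega

-- outer loop: after n rows (board width x ≥ 1), the rows follow the (r+c) parity
lemma outerA_nat (x : Int) (hx : 1 ≤ x) (n : Nat) :
    ((List.range n).map (fun k : Nat => (k : Int))).foldl (pvOuterA x) ([], [], 1)
      = ((List.range n).map (fun r : Nat =>
            (PySem.List.pyRange 0 x 1).map (fun c => ((r : Int) + c) % 2)),
         (List.range n).map (fun r : Nat =>
            (PySem.List.pyRange 0 x 1).map (fun c => ((r : Int), c))),
         ((n : Int) + 1) % 2) := by
  have hpr : PySem.List.pyRange 0 x 1 = (List.range x.toNat).map (fun k : Nat => (k : Int)) := by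
    rw [PySem.List.pyRange_one, Int.sub_zero]
    exact List.map_congr_left (fun k _ => by omega)
  induction n with
  | zero =>
    simp only [List.range_zero, List.map_nil, List.foldl_nil, Nat.cast_zero]
    norm_num
  | succ n ih =>
    rw [List.range_succ]
    simp only [List.map_append, List.map_cons, List.map_nil, List.foldl_append,
      List.foldl_cons, List.foldl_nil, ih, pvOuterA, Nat.cast_add, Nat.cast_one]
    rw [hpr, innerA_nat _ _ (by omega : ((n : Int) + 1) % 2 = 0 ∨ ((n : Int) + 1) % 2 = 1)]
    obtain ⟨m, hmm⟩ : ∃ m, x.toNat = m + 1 := ⟨x.toNat - 1, by omega⟩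
    refine congrArg₂ Prod.mk ?_ (congrArg₂ Prod.mk ?_ ?_)
    · congr 1
      congr 1
      rw [List.map_map]
      apply List.map_congr_left
      intro k _
      simp only [Function.comp_apply]
      omega
    · congr 1
      congr 1
      rw [List.map_map]
      rfl
    · rw [hmm, List.range_succ_eq_map]
      simp only [List.map_cons, Nat.cast_zero]
      simp [PySem.List.pyGet?, PySem.List.pyIdx?]
      omega

-- ===== VERDICT (by name: the statement is the Claim_ definition above) =====
theorem checkerboard_construct_spec : Claim_equal_checkerboard_construct := by
  intro x _
  unfold Spec_checkerboard_construct checkerboard_construct checkerboard_construct_alt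
  by_cases hx : x ≤ 0
  · rw [PySem.List.pyRange_one_eq_nil (by omega)]
    rfl
  · have hx1 : 1 ≤ x := by omega
    have hpr : PySem.List.pyRange 0 x 1 = (List.range x.toNat).map (fun k : Nat => (k : Int)) := by
      rw [PySem.List.pyRange_one, Int.sub_zero]
      exact List.map_congr_left (fun k _ => by omega)
    conv_lhs => rw [hpr]
    rw [outerA_nat x hx1, hpr]
    simp only [List.map_map]
    refine congrArg₂ Prod.mk ?_ ?_
    · refine List.map_congr_left (fun r _ => ?_)
      simp
    · refine List.map_congr_left (fun r _ => ?_)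
      simp
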